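-- pv_equiv track=rewrite | github.com/souluk319/ocp-rag-chatbot | src/play_book_studio/answering/answer_text_formatting.py | _group_reader_sentences
-- ===== SOURCE A (Python) =====
-- def _group_reader_sentences(sentences: list[str]) -> list[str]:
--     if not sentences:
--         return []
--     if len(sentences) <= 2:
--         combined = " ".join(sentences).strip()
--         if len(combined) > 150:
--             return [sentence.strip() for sentence in sentences if sentence.strip()]
--         return [" ".join(sentences).strip()]
--
--     paragraphs: list[str] = []
--     bucket: list[str] = []
--     bucket_length = 0
--     for sentence in sentences:
--         normalized = sentence.strip()
--         if not normalized:
--             continue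
--         if bucket and (bucket_length + len(normalized) > 180 or len(bucket) >= 2):
--             paragraphs.append(" ".join(bucket).strip())
--             bucket = []
--             bucket_length = 0
--         bucket.append(normalized)
--         bucket_length += len(normalized) + 1
--     if bucket:
--         paragraphs.append(" ".join(bucket).strip())
--     return paragraphs
-- ===== SOURCE B (Python) =====
-- def _group_reader_sentences(sentences: list[str]) -> list[str]:
--     if not sentences:
--         return []
--     if len(sentences) <= 2:
--         combined = " ".join(sentences).strip()
--         if len(combined) > 150:
--             return [sentence.strip() for sentence in sentences if sentence.strip()]
--         return [" ".join(sentences).strip()]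
--
--     norm = [s.strip() for s in sentences if s.strip()]
--     out: list[str] = []
--     i = 0
--     while i < len(norm):
--         if i + 1 < len(norm) and len(norm[i]) + 1 + len(norm[i + 1]) <= 180:
--             out.append(norm[i] + " " + norm[i + 1])
--             i += 2
--         else:
--             out.append(norm[i])
--             i += 1
--     return out
-- ===== Notes on version B (the rewrite author's own statement) =====
-- stated objective: alternative
-- what changed: Replaces A's accumulator-bucket state machine (bucket list, running bucket_length, flush-on-next-sentence) by a separate normalization pass followed by an index-free look-ahead pairing recursion that emits each paragraph directly, consuming one or two sentences per step.
import Mathlib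
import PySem

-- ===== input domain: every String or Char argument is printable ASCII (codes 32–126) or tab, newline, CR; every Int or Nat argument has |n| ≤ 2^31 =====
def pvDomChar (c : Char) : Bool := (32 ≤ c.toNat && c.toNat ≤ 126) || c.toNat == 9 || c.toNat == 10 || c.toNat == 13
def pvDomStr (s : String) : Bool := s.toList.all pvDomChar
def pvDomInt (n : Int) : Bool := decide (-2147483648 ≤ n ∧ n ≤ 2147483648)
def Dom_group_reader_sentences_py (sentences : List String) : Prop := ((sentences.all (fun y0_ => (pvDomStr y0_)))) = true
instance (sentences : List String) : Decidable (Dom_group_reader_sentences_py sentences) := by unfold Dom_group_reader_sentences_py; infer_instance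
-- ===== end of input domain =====

-- B replaces A's accumulator-bucket/flush-on-next loop by a filtering pass plus an
-- index-free look-ahead pairing recursion (same values; different decomposition).

-- ===== PORT A =====
-- one iteration of A's for-loop; state = (paragraphs, bucket, bucket_length)
def pyStepA (st : List String × List String × Int) (s : String) : List String × List String × Int :=
  let normalized := PySem.Str.strip s
  if normalized = "" then st
  else
    let st1 := if st.2.1 ≠ [] ∧ (st.2.2 + PySem.Str.len normalized > 180 ∨ 2 ≤ st.2.1.length)
               then (st.1 ++ [PySem.Str.strip (PySem.Str.join " " st.2.1)], ([] : List String), (0 : Int))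
               else st
    (st1.1, st1.2.1 ++ [normalized], st1.2.2 + PySem.Str.len normalized + 1)

def group_reader_sentences_py (sentences : List String) : List String :=
  if sentences = [] then []
  else if PySem.List.len sentences ≤ 2 then
    let combined := PySem.Str.strip (PySem.Str.join " " sentences)
    if PySem.Str.len combined > 150 then
      sentences.filterMap (fun s => if PySem.Str.strip s = "" then none else some (PySem.Str.strip s))
    else [PySem.Str.strip (PySem.Str.join " " sentences)]
  else
    let fin := sentences.foldl pyStepA ([], [], 0)
    if fin.2.1 ≠ [] then fin.1 ++ [PySem.Str.strip (PySem.Str.join " " fin.2.1)] else fin.1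

-- ===== PORT B =====
-- norm = [s.strip() for s in sentences if s.strip()]
def altNorm (sentences : List String) : List String :=
  sentences.filterMap (fun s => if PySem.Str.strip s = "" then none else some (PySem.Str.strip s))

-- the while loop with index look-ahead: consume one or two sentences per step
def altPair : List String → List String
  | [] => []
  | [x] => [x]
  | x :: y :: rest =>
    if PySem.Str.len x + 1 + PySem.Str.len y ≤ 180 then (x ++ " " ++ y) :: altPair rest
    else x :: altPair (y :: rest)

def group_reader_sentences_py_alt (sentences : List String) : List String :=
  if sentences = [] then []
  else if PySem.List.len sentences ≤ 2 then
    let combined := PySem.Str.strip (PySem.Str.join " " sentences)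
    if PySem.Str.len combined > 150 then
      sentences.filterMap (fun s => if PySem.Str.strip s = "" then none else some (PySem.Str.strip s))
    else [PySem.Str.strip (PySem.Str.join " " sentences)]
  else
    altPair (altNorm sentences)

-- ===== PRECONDITION & SPEC =====
def Spec_group_reader_sentences_py (sentences : List String) (out : List String) : Prop := out = group_reader_sentences_py_alt sentences
instance (sentences : List String) (out : List String) : Decidable (Spec_group_reader_sentences_py sentences out) := by unfold Spec_group_reader_sentences_py; infer_instance

-- ===== CLAIM (what is proved, stated in full; the proofs are below) =====
def Claim_equal_group_reader_sentences_py : Prop := ∀ (sentences : List String), Dom_group_reader_sentences_py sentences → Spec_group_reader_sentences_py sentences (group_reader_sentences_py sentences)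

-- ===== LEMMAS AND PROOFS =====

-- a char list is "good" when it neither starts nor ends with whitespace
def GoodC (cs : List Char) : Prop :=
  (∀ c ∈ cs.head?, PySem.Chars.isspace c = false) ∧ (∀ c ∈ cs.getLast?, PySem.Chars.isspace c = false)

theorem head?_dropWhile_not (p : Char → Bool) (l : List Char) :
    ∀ c ∈ (l.dropWhile p).head?, p c = false := by
  induction l with
  | nil => simp
  | cons a t ih =>
    intro c hc
    by_cases h : p a
    · rw [List.dropWhile_cons_of_pos h] at hc; exact ih c hc
    · rw [List.dropWhile_cons_of_neg h] at hc
      simp at hc; subst hc; simpa using h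

theorem goodC_strip (cs : List Char) : GoodC (PySem.Chars.strip cs) := by
  constructor
  · -- rstrip keeps a prefix, so a nonempty head is lstrip's head, which dropWhile made nonspace
    intro c hc
    simp only [PySem.Chars.strip, PySem.Chars.rstrip, PySem.Chars.lstrip] at hc
    have hpre : (List.dropWhile PySem.Chars.isspace
        (List.dropWhile PySem.Chars.isspace cs).reverse).reverse <+:
        List.dropWhile PySem.Chars.isspace cs := by
      have := List.reverse_prefix.mpr
        (List.dropWhile_suffix (l := (List.dropWhile PySem.Chars.isspace cs).reverse)
          PySem.Chars.isspace)
      simpa using this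
    obtain ⟨r, hr⟩ := hpre
    have : c ∈ (List.dropWhile PySem.Chars.isspace cs).head? := by
      rw [Option.mem_def] at hc ⊢
      rw [← hr, List.head?_append, hc]
      rfl
    exact head?_dropWhile_not _ _ c this
  · intro c hc
    simp only [PySem.Chars.strip, PySem.Chars.rstrip, PySem.Chars.lstrip] at hc
    rw [← List.head?_reverse, List.reverse_reverse] at hc
    exact head?_dropWhile_not _ _ c hc

theorem goodC_fix (cs : List Char) (h : GoodC cs) : PySem.Chars.strip cs = cs := by
  obtain ⟨h1, h2⟩ := h
  have hl : PySem.Chars.lstrip cs = cs := by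
    cases cs with
    | nil => rfl
    | cons a t =>
      have : PySem.Chars.isspace a = false := h1 a (by simp)
      simp [PySem.Chars.lstrip, this]
  have hr : PySem.Chars.rstrip cs = cs := by
    unfold PySem.Chars.rstrip
    cases hrev : cs.reverse with
    | nil =>
      have hnil : cs = [] := List.reverse_eq_nil_iff.mp hrev
      simp [hnil]
    | cons a t =>
      have ha : a ∈ cs.getLast? := by rw [← List.head?_reverse, hrev]; rfl
      have : PySem.Chars.isspace a = false := h2 a ha
      rw [List.dropWhile_cons_of_neg (by simp [this]), ← hrev, List.reverse_reverse]
  show PySem.Chars.rstrip (PySem.Chars.lstrip cs) = cs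
  rw [hl, hr]

theorem goodC_append (x y : List Char) (hx : GoodC x) (hy : GoodC y)
    (hx0 : x ≠ []) (hy0 : y ≠ []) : GoodC (x ++ ' ' :: y) := by
  constructor
  · intro c hc
    rw [List.head?_append] at hc
    cases hhd : x.head? with
    | none => exact absurd (List.head?_eq_none_iff.mp hhd) hx0
    | some a =>
      rw [hhd] at hc
      have hca : a = c := by simpa using hc
      subst hca
      exact hx.1 a (by simp [hhd])
  · intro c hc
    rw [List.getLast?_append_of_ne_nil _ (by simp)] at hc
    have : (' ' :: y).getLast? = y.getLast? := by
      have := List.getLast?_append_of_ne_nil (l₁ := [' ']) (l₂ := y) hy0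
      simpa using this
    rw [this] at hc
    exact hy.2 c hc

-- good, nonempty strings
def GoodS (s : String) : Prop := s.toList ≠ [] ∧ GoodC s.toList

theorem strip_goodS (x : String) (h : GoodS x) : PySem.Str.strip x = x := by
  rw [← String.toList_inj]
  simp [PySem.Str.strip, goodC_fix _ h.2]

theorem goodS_strip (s : String) (h : PySem.Str.strip s ≠ "") : GoodS (PySem.Str.strip s) := by
  refine ⟨by rw [ne_eq, String.toList_eq_nil_iff]; exact h, ?_⟩
  simp only [PySem.Str.strip, String.toList_ofList]
  exact goodC_strip _

theorem goodS_mem_altNorm (sentences : List String) :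
    ∀ x ∈ altNorm sentences, GoodS x := by
  intro x hx
  simp only [altNorm, List.mem_filterMap] at hx
  obtain ⟨s, _, hs⟩ := hx
  by_cases h : PySem.Str.strip s = ""
  · simp [h] at hs
  · simp only [h, if_false, Option.some.injEq] at hs
    exact hs ▸ goodS_strip s h

theorem join_one (x : String) (h : GoodS x) :
    PySem.Str.strip (PySem.Str.join " " [x]) = x := by
  rw [← String.toList_inj]
  simp [PySem.Str.strip, PySem.Str.join, PySem.Chars.join_singleton, goodC_fix _ h.2]

theorem join_two (x y : String) (hx : GoodS x) (hy : GoodS y) :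
    PySem.Str.strip (PySem.Str.join " " [x, y]) = x ++ " " ++ y := by
  rw [← String.toList_inj]
  have hfix := goodC_fix _ (goodC_append _ _ hx.2 hy.2 hx.1 hy.1)
  have hj : PySem.Chars.join [' '] [x.toList, y.toList] = x.toList ++ ' ' :: y.toList := by
    rw [PySem.Chars.join_cons_cons, PySem.Chars.join_singleton, List.append_assoc]
    rfl
  simp only [PySem.Str.strip, PySem.Str.join, String.toList_ofList]
  rw [show (" " : String).toList = [' '] from rfl, List.map_cons, List.map_cons,
    List.map_nil, hj, hfix]
  simp

-- the fold over sentences equals the fold over the normalized list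
theorem foldA_altNorm (sentences : List String) (st : List String × List String × Int) :
    sentences.foldl pyStepA st = (altNorm sentences).foldl pyStepA st := by
  induction sentences generalizing st with
  | nil => rfl
  | cons s rest ih =>
    rw [List.foldl_cons]
    by_cases h : PySem.Str.strip s = ""
    · have h1 : pyStepA st s = st := by simp [pyStepA, h]
      have h2 : altNorm (s :: rest) = altNorm rest := by
        simp [altNorm, h]
      rw [h1, h2, ih]
    · have h1 : pyStepA st s = pyStepA st (PySem.Str.strip s) := by
        simp only [pyStepA, strip_goodS _ (goodS_strip s h)]
      have h2 : altNorm (s :: rest) = PySem.Str.strip s :: altNorm rest := by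
        simp [altNorm, h]
      rw [h2, List.foldl_cons, h1, ih]

def finishA (st : List String × List String × Int) : List String :=
  if st.2.1 ≠ [] then st.1 ++ [PySem.Str.strip (PySem.Str.join " " st.2.1)] else st.1

theorem goodS_ne_empty (x : String) (h : GoodS x) : x ≠ "" := by
  intro h0; exact h.1 (by simp [h0])

-- the three shapes one loop iteration can take
theorem stepA_empty_bucket (paras : List String) (x : String) (hx : GoodS x) :
    pyStepA (paras, [], 0) x = (paras, [x], PySem.Str.len x + 1) := by
  simp [pyStepA, strip_goodS _ hx, goodS_ne_empty _ hx]

theorem stepA_one_keep (paras : List String) (x y : String) (L : Int) (hy : GoodS y)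
    (h : ¬ L + PySem.Str.len y > 180) :
    pyStepA (paras, [x], L) y = (paras, [x, y], L + PySem.Str.len y + 1) := by
  have h' : ¬ 180 < L + (y.length : Int) := by simpa [PySem.Str.len_eq] using h
  simp [pyStepA, strip_goodS _ hy, goodS_ne_empty _ hy, h']

theorem stepA_one_flush (paras : List String) (x y : String) (L : Int)
    (hx : GoodS x) (hy : GoodS y) (h : L + PySem.Str.len y > 180) :
    pyStepA (paras, [x], L) y = (paras ++ [x], [y], PySem.Str.len y + 1) := by
  have h' : 180 < L + (y.length : Int) := by simpa [PySem.Str.len_eq] using h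
  simp [pyStepA, strip_goodS _ hy, goodS_ne_empty _ hy, h', join_one x hx]

theorem stepA_two_flush (paras : List String) (x y z : String) (L : Int)
    (hx : GoodS x) (hy : GoodS y) (hz : GoodS z) :
    pyStepA (paras, [x, y], L) z = (paras ++ [x ++ " " ++ y], [z], PySem.Str.len z + 1) := by
  simp [pyStepA, strip_goodS _ hz, goodS_ne_empty _ hz, join_two x y hx hy]

-- main invariant: starting from an empty bucket, A's loop over good sentences
-- produces exactly the look-ahead pairing
theorem foldA_pair (norm : List String) (hP : ∀ x ∈ norm, GoodS x) :
    ∀ paras : List String,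
      finishA (norm.foldl pyStepA (paras, [], 0)) = paras ++ altPair norm := by
  induction norm using altPair.induct with
  | case1 => intro paras; simp [finishA, altPair]
  | case2 x =>
    intro paras
    have hx : GoodS x := hP x (by simp)
    rw [altPair, List.foldl_cons, stepA_empty_bucket paras x hx]
    simp [finishA, join_one x hx]
  | case3 x y rest hcond ih =>
    intro paras
    have hx : GoodS x := hP x (by simp)
    have hy : GoodS y := hP y (by simp)
    rw [altPair, if_pos hcond, List.foldl_cons, List.foldl_cons,
      stepA_empty_bucket paras x hx,
      stepA_one_keep paras x y _ hy (by omega)]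
    cases rest with
    | nil =>
      simp [finishA, altPair, join_two x y hx hy]
    | cons z rs =>
      have hz : GoodS z := hP z (by simp)
      rw [List.foldl_cons, stepA_two_flush paras x y z _ hx hy hz,
        show ((paras ++ [x ++ " " ++ y], [z], PySem.Str.len z + 1) :
            List String × List String × Int) =
          pyStepA (paras ++ [x ++ " " ++ y], [], 0) z from
          (stepA_empty_bucket _ z hz).symm,
        ← List.foldl_cons]
      have := ih (fun u hu => hP u (by simp at hu ⊢; tauto)) (paras ++ [x ++ " " ++ y])
      rw [this]
      simp
  | case4 x y rest hcond ih =>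
    intro paras
    have hx : GoodS x := hP x (by simp)
    have hy : GoodS y := hP y (by simp)
    rw [altPair, if_neg hcond, List.foldl_cons, List.foldl_cons,
      stepA_empty_bucket paras x hx,
      stepA_one_flush paras x y _ hx hy (by omega),
      show ((paras ++ [x], [y], PySem.Str.len y + 1) :
          List String × List String × Int) =
        pyStepA (paras ++ [x], [], 0) y from (stepA_empty_bucket _ y hy).symm,
      ← List.foldl_cons]
    have := ih (fun u hu => hP u (by simp at hu ⊢; tauto)) (paras ++ [x])
    rw [this]
    simp

-- ===== VERDICT (by name: the statement is the Claim_ definition above) =====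
theorem group_reader_sentences_py_spec : Claim_equal_group_reader_sentences_py := by
  intro sentences _
  unfold Spec_group_reader_sentences_py group_reader_sentences_py group_reader_sentences_py_alt
  by_cases h0 : sentences = []
  · simp [h0]
  · rw [if_neg h0, if_neg h0]
    by_cases h2 : PySem.List.len sentences ≤ 2
    · rw [if_pos h2, if_pos h2]
    · rw [if_neg h2, if_neg h2]
      have key := foldA_pair (altNorm sentences) (goodS_mem_altNorm sentences) []
      rw [foldA_altNorm]
      simpa [finishA] using key
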